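-- pv_equiv track=rewrite | github.com/kshitij1010/practice | interview/python/pramp/q3.py | find_busiest_period
-- ===== SOURCE A (Python) =====
-- def find_busiest_period(data):
--
--     timestamp = data[0][0]
--     max_crowd = 0
--     crowd_at_time = 0
--
--     for i in range(len(data)):
--         current_time, people, ent = data[i]
--
--         if ent == 1:
--             crowd_at_time += people
--         else:
--             crowd_at_time -= people
--
--         if (i == len(data)-1) or (current_time != data[i+1][0]):
--             if crowd_at_time > max_crowd:
--                 max_crowd = crowd_at_time
--                 timestamp = current_time
--
--     return timestamp
-- ===== SOURCE B (Python) =====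
-- def find_busiest_period(data):
--     best_time = data[0][0]
--     # pass 1: one (time, crowd-at-end-of-run) entry per run of equal consecutive timestamps
--     finals = []
--     crowd = 0
--     for t, p, e in data:
--         crowd = crowd + p if e == 1 else crowd - p
--         if finals and finals[-1][0] == t:
--             finals[-1] = (t, crowd)
--         else:
--             finals.append((t, crowd))
--     # pass 2: earliest run with strictly maximal crowd (max starts at 0)
--     best = 0
--     for t, c in finals:
--         if c > best:
--             best = c
--             best_time = t
--     return best_time
-- ===== Notes on version B (the rewrite author's own statement) =====
-- stated objective: alternative
-- what changed: Replaced A's single index loop with lookahead data[i+1] by a two-pass decomposition: pass 1 compresses the events into one (time, crowd) entry per run of equal consecutive timestamps by overwriting the last entry, pass 2 is a plain strict-max scan over those run summaries.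
import Mathlib
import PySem

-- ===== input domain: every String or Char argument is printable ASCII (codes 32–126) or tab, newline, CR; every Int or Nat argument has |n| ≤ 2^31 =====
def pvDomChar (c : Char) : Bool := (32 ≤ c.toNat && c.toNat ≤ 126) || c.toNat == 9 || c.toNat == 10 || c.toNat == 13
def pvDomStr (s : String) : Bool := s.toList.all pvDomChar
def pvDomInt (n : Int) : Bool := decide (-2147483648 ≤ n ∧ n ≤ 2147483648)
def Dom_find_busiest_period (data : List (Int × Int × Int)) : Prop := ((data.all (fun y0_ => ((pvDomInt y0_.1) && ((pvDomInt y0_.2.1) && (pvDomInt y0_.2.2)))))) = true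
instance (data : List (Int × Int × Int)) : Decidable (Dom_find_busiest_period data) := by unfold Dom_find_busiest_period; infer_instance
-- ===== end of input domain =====

-- B replaces A's indexed lookahead loop by two passes (run compression, then a max scan); objective: alternative decomposition, same cost.


-- ===== PORT A =====
-- A's loop: running crowd, and at the end of each run of equal consecutive
-- timestamps (i == len-1 or current_time != data[i+1][0]) a strict-max update.
def pvLoopA : List (Int × Int × Int) → Int → Int → Int → Int
  | [], timestamp, _, _ => timestamp
  | (t, p, e) :: rest, timestamp, maxCrowd, crowd =>
    let crowd' := if e = 1 then crowd + p else crowd - p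
    let runEnds : Bool := match rest with
      | [] => true
      | (t2, _, _) :: _ => decide (t ≠ t2)
    if runEnds ∧ crowd' > maxCrowd then
      pvLoopA rest t crowd' crowd'
    else
      pvLoopA rest timestamp maxCrowd crowd'

def find_busiest_period (data : List (Int × Int × Int)) : Int :=
  match data with
  | [] => 0   -- Python: data[0][0] raises IndexError; excluded by Pre_
  | (t0, _, _) :: _ => pvLoopA data t0 0 0

-- ===== PORT B =====
-- pass 1: build `finals`, one (time, crowd) entry per run, overwriting the last entry while the run continues
def pvPass1 : List (Int × Int × Int) → List (Int × Int) → Int → List (Int × Int) × Int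
  | [], finals, crowd => (finals, crowd)
  | (t, p, e) :: rest, finals, crowd =>
    let crowd' := if e = 1 then crowd + p else crowd - p
    let finals' := match finals.getLast? with
      | some (k, _) => if k = t then finals.dropLast ++ [(t, crowd')] else finals ++ [(t, crowd')]
      | none => finals ++ [(t, crowd')]
    pvPass1 rest finals' crowd'

-- pass 2: strict-max scan, max initialised to 0
def pvPass2 : List (Int × Int) → Int → Int → Int
  | [], _, bestTime => bestTime
  | (t, c) :: rest, best, bestTime =>
    if c > best then pvPass2 rest c t else pvPass2 rest best bestTime

def find_busiest_period_alt (data : List (Int × Int × Int)) : Int :=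
  match data with
  | [] => 0   -- Python: data[0][0] raises IndexError; excluded by Pre_
  | (t0, _, _) :: _ => pvPass2 (pvPass1 data [] 0).1 0 t0

-- ===== PRECONDITION & SPEC =====
-- Both Pythons raise IndexError on the empty list (data[0][0]); Pre_ excludes exactly that input.
def Pre_find_busiest_period (data : List (Int × Int × Int)) : Prop := data ≠ []
instance (data : List (Int × Int × Int)) : Decidable (Pre_find_busiest_period data) := by unfold Pre_find_busiest_period; infer_instance
def pvWitness_find_busiest_period : (List (Int × Int × Int)) := [(1, 2, 1), (1, 1, 0), (3, 5, 1)]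

def Spec_find_busiest_period (data : List (Int × Int × Int)) (out : Int) : Prop := out = find_busiest_period_alt data
instance (data : List (Int × Int × Int)) (out : Int) : Decidable (Spec_find_busiest_period data out) := by unfold Spec_find_busiest_period; infer_instance

-- ===== CLAIM (what is proved, stated in full; the proofs are below) =====
def Claim_equal_find_busiest_period : Prop := ∀ (data : List (Int × Int × Int)), Dom_find_busiest_period data → Pre_find_busiest_period data → Spec_find_busiest_period data (find_busiest_period data)

-- ===== LEMMAS AND PROOFS =====

-- the (time, crowd-at-end-of-run) summaries of the runs of equal consecutive timestamps
def pvRuns : Int → List (Int × Int × Int) → List (Int × Int)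
  | _, [] => []
  | c, (t, p, e) :: rest =>
    let c' := if e = 1 then c + p else c - p
    match rest with
    | [] => [(t, c')]
    | (t2, _, _) :: _ => if t = t2 then pvRuns c' rest else (t, c') :: pvRuns c' rest

theorem pvRuns_one (c t p e : Int) : pvRuns c [(t, p, e)] = [(t, if e = 1 then c + p else c - p)] := rfl

theorem pvRuns_cc (c t p e t2 p2 e2 : Int) (r : List (Int × Int × Int)) :
    pvRuns c ((t, p, e) :: (t2, p2, e2) :: r) =
      if t = t2 then pvRuns (if e = 1 then c + p else c - p) ((t2, p2, e2) :: r)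
      else (t, if e = 1 then c + p else c - p) :: pvRuns (if e = 1 then c + p else c - p) ((t2, p2, e2) :: r) := rfl

theorem pvLoopA_one (ts mx c t p e : Int) :
    pvLoopA [(t, p, e)] ts mx c =
      if (if e = 1 then c + p else c - p) > mx then t else ts := by
  by_cases h : (if e = 1 then c + p else c - p) > mx <;> simp [pvLoopA, h]

theorem pvLoopA_cc (ts mx c t p e t2 p2 e2 : Int) (r : List (Int × Int × Int)) :
    pvLoopA ((t, p, e) :: (t2, p2, e2) :: r) ts mx c =
      if t ≠ t2 ∧ (if e = 1 then c + p else c - p) > mx then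
        pvLoopA ((t2, p2, e2) :: r) t (if e = 1 then c + p else c - p) (if e = 1 then c + p else c - p)
      else
        pvLoopA ((t2, p2, e2) :: r) ts mx (if e = 1 then c + p else c - p) := by
  simp [pvLoopA]

theorem pvLoopA_eq_pass2_runs : ∀ (data : List (Int × Int × Int)) (ts mx c : Int),
    pvLoopA data ts mx c = pvPass2 (pvRuns c data) mx ts := by
  intro data
  induction data with
  | nil => intro ts mx c; simp [pvLoopA, pvRuns, pvPass2]
  | cons hd rest ih =>
    obtain ⟨t, p, e⟩ := hd
    intro ts mx c
    cases rest with
    | nil =>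
      rw [pvLoopA_one, pvRuns_one]
      by_cases h : (if e = 1 then c + p else c - p) > mx <;> simp [h, pvPass2]
    | cons hd2 rest2 =>
      obtain ⟨t2, p2, e2⟩ := hd2
      rw [pvLoopA_cc, pvRuns_cc]
      by_cases ht : t = t2
      · simp [ht, ih]
      · simp only [ht, if_neg, ne_eq, not_false_iff, true_and]
        by_cases h : (if e = 1 then c + p else c - p) > mx <;> simp [h, ih, pvPass2]

-- does `data` start with the same timestamp as the last entry of `finals`?
def pvCont (finals : List (Int × Int)) (data : List (Int × Int × Int)) : Bool :=
  match data with
  | (t, _, _) :: _ =>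
    match finals.getLast? with
    | some (k, _) => decide (k = t)
    | none => false
  | [] => false

theorem pvPass1_cons (t p e c : Int) (rest : List (Int × Int × Int)) (finals : List (Int × Int)) :
    pvPass1 ((t, p, e) :: rest) finals c =
      pvPass1 rest
        (match finals.getLast? with
          | some (k, _) => if k = t then finals.dropLast ++ [(t, if e = 1 then c + p else c - p)]
                           else finals ++ [(t, if e = 1 then c + p else c - p)]
          | none => finals ++ [(t, if e = 1 then c + p else c - p)])
        (if e = 1 then c + p else c - p) := rfl

theorem pvPass1_eq_runs : ∀ (data : List (Int × Int × Int)) (finals : List (Int × Int)) (c : Int),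
    (pvPass1 data finals c).1 =
      (if pvCont finals data then finals.dropLast else finals) ++ pvRuns c data := by
  intro data
  induction data with
  | nil => intro finals c; simp [pvPass1, pvRuns, pvCont]
  | cons hd rest ih =>
    obtain ⟨t, p, e⟩ := hd
    intro finals c
    have harg : (match finals.getLast? with
        | some (k, _) => if k = t then finals.dropLast ++ [(t, if e = 1 then c + p else c - p)]
                         else finals ++ [(t, if e = 1 then c + p else c - p)]
        | none => finals ++ [(t, if e = 1 then c + p else c - p)]) =
        (if pvCont finals ((t, p, e) :: rest) then finals.dropLast else finals)
          ++ [(t, if e = 1 then c + p else c - p)] := by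
      cases hlast : finals.getLast? with
      | none => simp [pvCont, hlast]
      | some kv =>
        obtain ⟨k, v⟩ := kv
        by_cases hk : k = t <;> simp [pvCont, hlast, hk]
    rw [pvPass1_cons, harg, ih]
    have hdrop : ((if pvCont finals ((t, p, e) :: rest) then finals.dropLast else finals)
        ++ [(t, if e = 1 then c + p else c - p)]).dropLast =
        (if pvCont finals ((t, p, e) :: rest) then finals.dropLast else finals) :=
      List.dropLast_concat
    cases rest with
    | nil => simp [pvCont, pvRuns]
    | cons hd2 rest2 =>
      obtain ⟨t2, p2, e2⟩ := hd2
      by_cases ht : t = t2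
      · subst ht
        have hcont : pvCont ((if pvCont finals ((t, p, e) :: (t, p2, e2) :: rest2) then finals.dropLast else finals)
            ++ [(t, if e = 1 then c + p else c - p)]) ((t, p2, e2) :: rest2) = true := by
          simp [pvCont]
        rw [pvRuns_cc]
        simp [hcont, hdrop]
      · have hcont : pvCont ((if pvCont finals ((t, p, e) :: (t2, p2, e2) :: rest2) then finals.dropLast else finals)
            ++ [(t, if e = 1 then c + p else c - p)]) ((t2, p2, e2) :: rest2) = false := by
          simp [pvCont, ht]
        rw [pvRuns_cc]
        simp [hcont, ht]

-- ===== VERDICT (by name: the statement is the Claim_ definition above) =====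
theorem find_busiest_period_spec : Claim_equal_find_busiest_period := by
  intro data _ hpre
  unfold Spec_find_busiest_period
  match data with
  | [] => exact absurd rfl hpre
  | (t0, p0, e0) :: rest =>
    show pvLoopA ((t0, p0, e0) :: rest) t0 0 0 = pvPass2 (pvPass1 ((t0, p0, e0) :: rest) [] 0).1 0 t0
    rw [pvPass1_eq_runs, pvLoopA_eq_pass2_runs]
    simp [pvCont]
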